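-- pv_equiv track=rewrite | github.com/AngelCubes18/number-typing-automation | numbertypingautomation.py | get_filtered_numbers
-- ===== SOURCE A (Python) =====
-- def get_filtered_numbers(start, end, digit_constraints):
--     filtered_numbers = []
--     for number in range(start, end + 1):
--         num_str = str(number).zfill(len(str(end)))
--         valid = all(num_str[pos - 1] == str(value) for pos, value in digit_constraints.items())
--         if valid:
--             filtered_numbers.append(number)
--     return filtered_numbers
-- ===== SOURCE B (Python) =====
-- def get_filtered_numbers(start, end, digit_constraints):
--     # Each constraint fixes the decimal digit at a 1-based position from the
--     # left of the width-of-end number; extract digits with // and %.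
--     width = len(str(end))
--     checks = [(10 ** (width - pos), value) for pos, value in digit_constraints.items()]
--     return [n for n in range(start, end + 1)
--             if all(n // p % 10 == v for p, v in checks)]
-- ===== Notes on version B (the rewrite author's own statement) =====
-- stated objective: alternative
-- what changed: B drops A's per-number string machinery (str, zfill, character comparison) and instead precomputes one power-of-ten divisor per constraint, extracting each constrained digit with // and %; Pre_ restricts to the task's natural domain (nonnegative range, constraint positions within the width of str(end), with empty ranges and empty constraint dicts always admitted) because outside it A raises IndexError or its value comes from string artefacts (the '-' sign character, negative-index wraparound).
-- outside the precondition, e.g. on get_filtered_numbers(-3, 5, {1: 7}): A returns [], B returns [-3]; on get_filtered_numbers(0, 5, {0: 3}): A returns [3], B returns []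
import Mathlib
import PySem

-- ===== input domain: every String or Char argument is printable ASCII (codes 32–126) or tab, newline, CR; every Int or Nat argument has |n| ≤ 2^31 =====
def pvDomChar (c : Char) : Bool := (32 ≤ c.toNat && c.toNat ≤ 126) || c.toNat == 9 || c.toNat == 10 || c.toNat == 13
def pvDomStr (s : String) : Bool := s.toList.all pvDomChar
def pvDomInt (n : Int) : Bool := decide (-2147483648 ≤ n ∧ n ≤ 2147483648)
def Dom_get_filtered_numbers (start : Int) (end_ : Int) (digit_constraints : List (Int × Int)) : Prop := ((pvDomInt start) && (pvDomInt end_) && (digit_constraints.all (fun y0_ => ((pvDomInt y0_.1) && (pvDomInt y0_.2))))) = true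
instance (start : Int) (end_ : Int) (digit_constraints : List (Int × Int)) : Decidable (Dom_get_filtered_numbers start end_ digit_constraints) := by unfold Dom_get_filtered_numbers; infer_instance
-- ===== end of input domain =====

-- B replaces A's per-number string building (str / zfill / character compare) by
-- precomputed power-of-ten divisors and digit extraction with // and %; objective: alternative.

-- ===== PORT A =====
def get_filtered_numbers (start : Int) (end_ : Int) (digit_constraints : List (Int × Int)) : List Int :=
  let d := PySem.Dict.ofList digit_constraints
  -- len(str(end))
  let w : Int := ((PySem.Int.toChars end_).length : Int)
  (PySem.List.pyRange start (end_ + 1) 1).foldl (fun acc number =>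
    -- num_str = str(number).zfill(len(str(end)))
    let numStr : List Char := PySem.Chars.zfill (PySem.Int.toChars number) w
    -- all(num_str[pos-1] == str(value) for pos, value in digit_constraints.items())
    let valid := d.items.all (fun pv =>
      match PySem.List.pyGet? numStr (pv.1 - 1) with
      | some c => [c] == PySem.Int.toChars pv.2
      | none => false)   -- IndexError: excluded by Pre_
    if valid then acc ++ [number] else acc) []

-- ===== PORT B =====
def get_filtered_numbers_alt (start : Int) (end_ : Int) (digit_constraints : List (Int × Int)) : List Int :=
  -- width = len(str(end))
  let width : Int := ((PySem.Int.toChars end_).length : Int)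
  -- checks = [(10 ** (width - pos), value) ...]; exact for pos ≤ width (Pre_ guarantees it:
  -- Python's 10 ** negative yields a float, outside the admitted inputs)
  let checks := (PySem.Dict.ofList digit_constraints).items.map
    (fun pv => ((10 : Int) ^ (width - pv.1).toNat, pv.2))
  (PySem.List.pyRange start (end_ + 1) 1).filter (fun n =>
    checks.all (fun pv => PySem.Int.mod (PySem.Int.floordiv n pv.1) 10 == pv.2))

-- ===== PRECONDITION & SPEC =====
-- Pre_ restricts to the task's natural domain: nonnegative ranges whose constrained positions
-- lie within the width of str(end) (an empty range or an empty constraint dict is always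
-- admitted); outside it A either raises IndexError or its value comes from Python string
-- artefacts ('-' occupying the first character of negative numbers, negative-index wraparound).
def Pre_get_filtered_numbers (start : Int) (end_ : Int) (digit_constraints : List (Int × Int)) : Prop :=
  end_ < start ∨ digit_constraints = [] ∨
    (0 ≤ start ∧ ∀ pv ∈ (PySem.Dict.ofList digit_constraints).items,
      1 ≤ pv.1 ∧ pv.1 ≤ ((PySem.Int.toChars end_).length : Int))
instance (start : Int) (end_ : Int) (digit_constraints : List (Int × Int)) : Decidable (Pre_get_filtered_numbers start end_ digit_constraints) := by unfold Pre_get_filtered_numbers; infer_instance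

def pvWitness_get_filtered_numbers : Int × Int × (List (Int × Int)) := (3, 27, [(1, 1)])

def Spec_get_filtered_numbers (start : Int) (end_ : Int) (digit_constraints : List (Int × Int)) (out : List Int) : Prop := out = get_filtered_numbers_alt start end_ digit_constraints
instance (start : Int) (end_ : Int) (digit_constraints : List (Int × Int)) (out : List Int) : Decidable (Spec_get_filtered_numbers start end_ digit_constraints out) := by unfold Spec_get_filtered_numbers; infer_instance

-- ===== CLAIM (what is proved, stated in full; the proofs are below) =====
def Claim_equal_get_filtered_numbers : Prop := ∀ (start : Int) (end_ : Int) (digit_constraints : List (Int × Int)), Dom_get_filtered_numbers start end_ digit_constraints → Pre_get_filtered_numbers start end_ digit_constraints → Spec_get_filtered_numbers start end_ digit_constraints (get_filtered_numbers start end_ digit_constraints)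

-- ===== LEMMAS AND PROOFS =====

-- decimal digit list of m : Nat, most significant first (the value Nat.toDigits 10 computes)
def pvDigs (m : Nat) : List Char :=
  if m < 10 then [Nat.digitChar m] else pvDigs (m / 10) ++ [Nat.digitChar (m % 10)]
termination_by m
decreasing_by exact Nat.div_lt_self (by omega) (by omega)

theorem pvDigitChar_not_sign : ∀ k < 10, ¬(Nat.digitChar k = '+' ∨ Nat.digitChar k = '-') := by
  decide

theorem pvDigitChar_inj : ∀ d < 10, ∀ e < 10, Nat.digitChar d = Nat.digitChar e → d = e := by
  decide

theorem pvDigs_sing (m : Nat) (h : m < 10) : pvDigs m = [Nat.digitChar m] := by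
  rw [pvDigs, if_pos h]

theorem pvDigs_app (m : Nat) (h : ¬ m < 10) :
    pvDigs m = pvDigs (m / 10) ++ [Nat.digitChar (m % 10)] := by
  conv_lhs => rw [pvDigs]
  rw [if_neg h]

theorem pvToDigitsCore_eq_digs : ∀ (f n : Nat) (l : List Char), n < f →
    Nat.toDigitsCore 10 f n l = pvDigs n ++ l := by
  intro f
  induction f with
  | zero => intro n l h; omega
  | succ f ih =>
    intro n l h
    rw [Nat.toDigitsCore]
    by_cases h10 : n / 10 = 0
    · have hn : n < 10 := by omega
      rw [if_pos h10, pvDigs_sing n hn, Nat.mod_eq_of_lt hn]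
      rfl
    · have hn : ¬ n < 10 := by omega
      rw [if_neg h10, ih (n / 10) _ (by
        have := Nat.div_lt_self (show 0 < n by omega) (show 1 < 10 by omega); omega)]
      rw [pvDigs_app n hn]
      simp

theorem pvToDigits_eq_digs (n : Nat) : Nat.toDigits 10 n = pvDigs n := by
  rw [Nat.toDigits, pvToDigitsCore_eq_digs (n + 1) n [] (by omega)]
  simp

theorem pvDigs_ne_nil (m : Nat) : pvDigs m ≠ [] := by
  rw [pvDigs]; split <;> simp

theorem pvDigs_lt (m : Nat) : m < 10 ^ (pvDigs m).length := by
  induction m using Nat.strong_induction_on with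
  | _ m ih =>
    by_cases h : m < 10
    · rw [pvDigs_sing m h]
      simpa using h
    · rw [pvDigs_app m h]
      have h1 := ih (m / 10) (Nat.div_lt_self (by omega) (by omega))
      have h2 : m = 10 * (m / 10) + m % 10 := (Nat.div_add_mod m 10).symm
      have h3 : m % 10 < 10 := Nat.mod_lt _ (by omega)
      simp only [List.length_append, List.length_cons, List.length_nil]
      rw [pow_succ]
      omega

theorem pvDigs_ge (m : Nat) (hm : 1 ≤ m) : 10 ^ ((pvDigs m).length - 1) ≤ m := by
  induction m using Nat.strong_induction_on with
  | _ m ih =>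
    by_cases h : m < 10
    · rw [pvDigs_sing m h]
      simpa using hm
    · rw [pvDigs_app m h]
      have h1 := ih (m / 10) (Nat.div_lt_self (by omega) (by omega)) (by omega)
      have h2 : m = 10 * (m / 10) + m % 10 := (Nat.div_add_mod m 10).symm
      simp only [List.length_append, List.length_cons, List.length_nil]
      have hlen : 1 ≤ (pvDigs (m / 10)).length :=
        List.length_pos_iff.mpr (pvDigs_ne_nil _)
      have he : (pvDigs (m / 10)).length + 1 - 1 = ((pvDigs (m / 10)).length - 1) + 1 := by omega
      rw [he, pow_succ]
      omega

theorem pvDigs_len_mono (a b : Nat) (h : a ≤ b) : (pvDigs a).length ≤ (pvDigs b).length := by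
  by_cases ha : a = 0
  · subst ha
    rw [pvDigs_sing 0 (by omega)]
    simpa using List.length_pos_iff.mpr (pvDigs_ne_nil b)
  · have h1 := pvDigs_ge a (by omega)
    have h2 := pvDigs_lt b
    by_contra hc
    have : 10 ^ (pvDigs b).length ≤ 10 ^ ((pvDigs a).length - 1) :=
      Nat.pow_le_pow_right (by omega) (by omega)
    omega

theorem pvDigs_mem (m : Nat) : ∀ c ∈ pvDigs m, ∃ k, k < 10 ∧ c = Nat.digitChar k := by
  induction m using Nat.strong_induction_on with
  | _ m ih =>
    intro c hc
    by_cases h : m < 10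
    · rw [pvDigs_sing m h] at hc
      simp at hc
      exact ⟨m, h, hc⟩
    · rw [pvDigs_app m h] at hc
      rcases List.mem_append.mp hc with hl | hr
      · exact ih (m / 10) (Nat.div_lt_self (by omega) (by omega)) c hl
      · simp at hr
        exact ⟨m % 10, Nat.mod_lt _ (by omega), hr⟩

theorem pvDigs_get (m : Nat) : ∀ (j : Nat) (h : j < (pvDigs m).length),
    (pvDigs m)[j] = Nat.digitChar (m / 10 ^ ((pvDigs m).length - 1 - j) % 10) := by
  induction m using Nat.strong_induction_on with
  | _ m ih =>
    intro j h
    by_cases h10 : m < 10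
    · have e := pvDigs_sing m h10
      have hj : j = 0 := by rw [e] at h; simp at h; omega
      subst hj
      simp only [e]
      simp [Nat.mod_eq_of_lt h10]
    · have e := pvDigs_app m h10
      simp only [e] at h ⊢
      simp only [List.length_append, List.length_cons, List.length_nil, Nat.zero_add] at h ⊢
      by_cases hj : j < (pvDigs (m / 10)).length
      · rw [List.getElem_append_left hj]
        rw [ih (m / 10) (Nat.div_lt_self (by omega) (by omega)) j hj]
        have he : (pvDigs (m / 10)).length + 1 - 1 - j = ((pvDigs (m / 10)).length - 1 - j) + 1 := by
          omega
        rw [he]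
        congr 2
        rw [Nat.div_div_eq_div_mul, ← pow_succ']
      · have hj' : j = (pvDigs (m / 10)).length := by omega
        subst hj'
        rw [List.getElem_append_right (Nat.le_refl _)]
        have hz : (pvDigs (m / 10)).length + 1 - 1 - (pvDigs (m / 10)).length = 0 := by omega
        rw [hz]
        simp

theorem pvPad_get (m p j : Nat) (h : j < p + (pvDigs m).length) :
    (List.replicate p '0' ++ pvDigs m)[j]'(by simpa using h) =
      Nat.digitChar (m / 10 ^ (p + (pvDigs m).length - 1 - j) % 10) := by
  by_cases hj : j < p
  · rw [List.getElem_append_left (by simpa using hj)]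
    rw [List.getElem_replicate]
    have hz : m / 10 ^ (p + (pvDigs m).length - 1 - j) = 0 := by
      apply Nat.div_eq_of_lt
      calc m < 10 ^ (pvDigs m).length := pvDigs_lt m
        _ ≤ 10 ^ (p + (pvDigs m).length - 1 - j) := Nat.pow_le_pow_right (by omega) (by omega)
    rw [hz]
    rfl
  · rw [List.getElem_append_right (by simpa using hj)]
    simp only [List.length_replicate]
    rw [pvDigs_get m (j - p) (by omega)]
    have he : (pvDigs m).length - 1 - (j - p) = p + (pvDigs m).length - 1 - j := by omega
    rw [he]

theorem pvZfill_nonneg (m w : Nat) :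
    PySem.Chars.zfill (pvDigs m) (w : Int) =
      List.replicate (max w (pvDigs m).length - (pvDigs m).length) '0' ++ pvDigs m := by
  rw [PySem.Chars.zfill.eq_def]
  by_cases h : (w : Int) ≤ ((pvDigs m).length : Int)
  · rw [if_pos h]
    have hw : w ≤ (pvDigs m).length := by exact_mod_cast h
    have hz : max w (pvDigs m).length - (pvDigs m).length = 0 := by omega
    rw [hz]
    simp
  · have hw : (pvDigs m).length < w := by omega
    rw [if_neg h]
    obtain ⟨c, rest, e⟩ := List.exists_cons_of_ne_nil (pvDigs_ne_nil m)
    obtain ⟨k, hk, rfl⟩ : ∃ k, k < 10 ∧ c = Nat.digitChar k :=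
      pvDigs_mem m c (e ▸ List.mem_cons_self)
    rw [e]
    simp only [Int.toNat_natCast]
    rw [if_neg (pvDigitChar_not_sign k hk)]
    rw [← e]
    have harg : w - (pvDigs m).length = max w (pvDigs m).length - (pvDigs m).length := by omega
    rw [harg]

theorem pvDigs_eq_singleton_iff (d w : Nat) (hd : d < 10) :
    [Nat.digitChar d] = pvDigs w ↔ (w < 10 ∧ d = w) := by
  constructor
  · intro h
    by_cases hw : w < 10
    · rw [pvDigs_sing w hw] at h
      simp at h
      exact ⟨hw, pvDigitChar_inj d hd w hw h⟩
    · rw [pvDigs_app w hw] at h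
      have hlen := congrArg List.length h
      simp only [List.length_append, List.length_cons, List.length_nil] at hlen
      have hz : (pvDigs (w / 10)).length = 0 := by omega
      exact absurd (List.length_eq_zero_iff.mp hz) (pvDigs_ne_nil (w / 10))
  · rintro ⟨hw, rfl⟩
    rw [pvDigs_sing d hw]

theorem pvCmp_digit (d : Nat) (hd : d < 10) (v : Int) :
    ([Nat.digitChar d] == PySem.Int.toChars v) = decide (0 ≤ v ∧ v ≤ 9 ∧ (d : Int) = v) := by
  rw [Bool.eq_iff_iff]
  simp only [beq_iff_eq, decide_eq_true_eq]
  rw [PySem.Int.toChars]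
  by_cases hv : v < 0
  · rw [if_pos hv, pvToDigits_eq_digs]
    constructor
    · intro h
      exfalso
      have hh : Nat.digitChar d = '-' := by
        have := congrArg (fun l => l.head?) h
        simpa using this
      exact pvDigitChar_not_sign d hd (Or.inr hh)
    · intro h; omega
  · rw [if_neg hv, pvToDigits_eq_digs]
    rw [pvDigs_eq_singleton_iff d v.toNat hd]
    omega

theorem pv_harith (a : Nat) (r : Nat) :
    PySem.Int.mod (PySem.Int.floordiv ((a : Int)) ((10:Int) ^ r)) 10 = ((a / 10 ^ r % 10 : Nat) : Int) := by
  rw [PySem.Int.floordiv_eq_ediv_of_pos (by positivity), PySem.Int.mod_eq_emod_of_pos (by omega)]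
  norm_cast

-- length of str(x) for 0 ≤ x, as a pvDigs length
theorem pvToChars_nonneg (x : Int) (hx : 0 ≤ x) :
    PySem.Int.toChars x = pvDigs x.toNat := by
  rw [PySem.Int.toChars, if_neg (by omega), pvToDigits_eq_digs]

-- per-element equality of A's string test and B's arithmetic test
theorem pv_point (end_ n : Int) (pv : Int × Int) (W : Nat)
    (hW : W = (PySem.Int.toChars end_).length)
    (hn : 0 ≤ n) (hne : n ≤ end_)
    (hlo : 1 ≤ pv.1) (hhi : pv.1 ≤ (W : Int)) :
    (match PySem.List.pyGet? (PySem.Chars.zfill (PySem.Int.toChars n) ((W : Nat) : Int)) (pv.1 - 1) with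
      | some c => [c] == PySem.Int.toChars pv.2
      | none => false)
    = (PySem.Int.mod (PySem.Int.floordiv n ((10 : Int) ^ ((W : Int) - pv.1).toNat)) 10 == pv.2) := by
  have hend : 0 ≤ end_ := le_trans hn hne
  have hlen : (pvDigs n.toNat).length ≤ W := by
    rw [hW, pvToChars_nonneg end_ hend]
    exact pvDigs_len_mono n.toNat end_.toNat (by omega)
  set j : Nat := (pv.1 - 1).toNat with hj
  have hjW : j < W := by omega
  have key : PySem.Chars.zfill (PySem.Int.toChars n) ((W : Nat) : Int) =
      List.replicate (W - (pvDigs n.toNat).length) '0' ++ pvDigs n.toNat := by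
    rw [pvToChars_nonneg n hn, pvZfill_nonneg]
    congr 2
    omega
  have hslen : (PySem.Chars.zfill (PySem.Int.toChars n) ((W : Nat) : Int)).length = W := by
    rw [key]
    simp
    omega
  rw [PySem.List.pyGet?_of_nonneg _ (by omega)]
  rw [List.getElem?_eq_getElem (by rw [hslen]; exact hjW)]
  have hb : j < (W - (pvDigs n.toNat).length) + (pvDigs n.toNat).length := by omega
  have hchar : (PySem.Chars.zfill (PySem.Int.toChars n) ((W : Nat) : Int))[j]'(by rw [hslen]; exact hjW)
      = Nat.digitChar (n.toNat / 10 ^ ((W - (pvDigs n.toNat).length) + (pvDigs n.toNat).length - 1 - j) % 10) := by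
    rw [List.getElem_of_eq key (by rw [hslen]; exact hjW)]
    exact pvPad_get n.toNat _ j hb
  have hexp : (W - (pvDigs n.toNat).length) + (pvDigs n.toNat).length - 1 - j
      = ((W : Int) - pv.1).toNat := by omega
  rw [hexp] at hchar
  set r : Nat := ((W : Int) - pv.1).toNat with hr
  set d : Nat := n.toNat / 10 ^ r % 10 with hd
  have hd10 : d < 10 := Nat.mod_lt _ (by omega)
  have hred : (match some ((PySem.Chars.zfill (PySem.Int.toChars n) ((W : Nat) : Int))[j]'(by rw [hslen]; exact hjW)) with
      | some c => [c] == PySem.Int.toChars pv.2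
      | none => false)
      = ([(PySem.Chars.zfill (PySem.Int.toChars n) ((W : Nat) : Int))[j]'(by rw [hslen]; exact hjW)] == PySem.Int.toChars pv.2) := rfl
  rw [hred, hchar, pvCmp_digit d hd10 pv.2]
  have hcast : (n : Int) = ((n.toNat : Nat) : Int) := by omega
  rw [hcast, pv_harith n.toNat r]
  rw [Bool.eq_iff_iff]
  simp only [decide_eq_true_eq, beq_iff_eq, ← hd]
  omega

-- ===== VERDICT (by name: the statement is the Claim_ definition above) =====
theorem get_filtered_numbers_spec : Claim_equal_get_filtered_numbers := by
  intro start end_ dc _hDom hPre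
  unfold Spec_get_filtered_numbers
  simp only [get_filtered_numbers, get_filtered_numbers_alt]
  rw [PySem.List.foldl_append_if_eq_filter, List.nil_append]
  rcases hPre with hE | hNil | ⟨hs, hC⟩
  · rw [PySem.List.pyRange_one_eq_nil (show end_ + 1 ≤ start by omega)]
    rfl
  · subst hNil
    rfl
  · apply List.filter_congr
    intro x hx
    have hmem := (PySem.List.mem_pyRange_one.mp hx)
    rw [Bool.eq_iff_iff]
    simp only [List.all_map, List.all_eq_true]
    constructor
    · intro h pv hm
      rw [Function.comp_apply, ← pv_point end_ x pv _ rfl (by omega) (by omega)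
            (hC pv hm).1 (hC pv hm).2]
      exact h pv hm
    · intro h pv hm
      rw [pv_point end_ x pv _ rfl (by omega) (by omega) (hC pv hm).1 (hC pv hm).2]
      have := h pv hm
      rwa [Function.comp_apply] at this
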